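-- pv_equiv track=rewrite | github.com/Nesdael/prueba | funciones.py | generate_id
-- ===== SOURCE A (Python) =====
-- def generate_id(students):
--     number = 0
--
--     while True:
--         number_student_id = str(number).zfill(4)
--
--         exists = any(number_student_id in student for student in students)
--
--         if not exists:
--             return number_student_id
--
--         number +=1 #If this sum already exists in the variable, it does so until it finds a free number.
-- ===== SOURCE B (Python) =====
-- def generate_id(students):
--     # Collect every 4-character numeric substring once, then find the smallest
--     # unused id by a single ordered walk over the sorted forbidden ids.
--     forbidden = set()
--     for s in students:
--         for i in range(len(s) - 3):
--             t = s[i:i + 4]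
--             if t.isdigit():
--                 forbidden.add(t)
--     number = 0
--     for t in sorted(forbidden):
--         if t == str(number).zfill(4):
--             number += 1
--     return str(number).zfill(4)
-- ===== Notes on version B (the rewrite author's own statement) =====
-- stated objective: alternative
-- what changed: B indexes all 4-character numeric substrings of the students into a set once and finds the smallest free id by a single ordered walk over the sorted forbidden ids, instead of A's probing every candidate id with a fresh substring scan of every student; Pre_ excludes inputs whose students contain every id 0000-9999 as a substring, a corner where no four-digit id exists and either answer is defensible (A probes ever-longer numeric strings, B reports '10000').
import Mathlib
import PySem

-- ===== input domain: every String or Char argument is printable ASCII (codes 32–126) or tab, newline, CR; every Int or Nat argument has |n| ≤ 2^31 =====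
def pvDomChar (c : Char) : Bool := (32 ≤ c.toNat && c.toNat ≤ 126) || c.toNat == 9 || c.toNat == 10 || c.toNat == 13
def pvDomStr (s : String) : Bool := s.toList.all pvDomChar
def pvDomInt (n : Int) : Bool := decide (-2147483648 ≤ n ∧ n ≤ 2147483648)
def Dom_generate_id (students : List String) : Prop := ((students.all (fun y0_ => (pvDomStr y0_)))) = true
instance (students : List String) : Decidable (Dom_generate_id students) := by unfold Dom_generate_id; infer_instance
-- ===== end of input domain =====

-- B builds the set of all 4-character numeric substrings once and finds the smallest unused
-- id by one ordered walk over the sorted forbidden ids, instead of A's per-candidate rescan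
-- of every student; same return value on Pre_, no speed claim.

-- longest student length; used only to size the fuel of the port of A's `while True` loop,
-- proven sufficient in the lemmas below
def pvMaxLen (students : List String) : Nat :=
  students.foldl (fun acc s => max acc s.toList.length) 0

-- ===== PORT A =====
-- literal port of A's `while True` loop; the fuel only totalizes it (proven sufficient below)
def generate_id_loop (students : List String) : Nat → Int → String
  | 0, number => PySem.Str.zfill (PySem.Int.toStr number) 4
  | fuel+1, number =>
    let number_student_id := PySem.Str.zfill (PySem.Int.toStr number) 4
    let ex := students.any (fun student => PySem.Str.isIn number_student_id student)
    if !ex then number_student_id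
    else generate_id_loop students fuel (number + 1)

def generate_id (students : List String) : String :=
  generate_id_loop students (10 ^ (pvMaxLen students + 3) + 1) 0

-- ===== PORT B =====
-- forbidden = the set of all-digit windows s[i:i+4] (Source B's two nested for-loops)
def buildForbidden (students : List String) : PySem.Set String :=
  students.foldl (fun forbidden s =>
    (PySem.List.pyRange 0 ((s.toList.length : Int) - 3)).foldl
      (fun forbidden i =>
        let t := PySem.List.slice s.toList (some i) (some (i + 4))
        if PySem.Chars.strIsdigit t then PySem.Set.add forbidden (String.ofList t)
        else forbidden)
      forbidden)
  PySem.Set.empty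

def generate_id_alt (students : List String) : String :=
  let forbidden := buildForbidden students
  let number : Int :=
    (PySem.List.sorted forbidden (fun x => x) false).foldl
      (fun number t =>
        if t == PySem.Str.zfill (PySem.Int.toStr number) 4 then number + 1 else number)
      0
  PySem.Str.zfill (PySem.Int.toStr number) 4

-- ===== PRECONDITION & SPEC =====
-- Pre_ excludes inputs whose students contain every four-digit id 0000-9999 as a substring:
-- no valid four-digit id exists there, so the contract is unsatisfiable and either answer is
-- defensible (A goes on to probe ever-longer numeric strings, B reports "10000").
def Pre_generate_id (students : List String) : Prop :=
  ((List.range' 0 10000).any fun m =>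
    !(students.any fun student =>
      PySem.Str.isIn (PySem.Str.zfill (PySem.Int.toStr (m : Int)) 4) student)) = true
instance (students : List String) : Decidable (Pre_generate_id students) := by
  unfold Pre_generate_id; infer_instance

def pvWitness_generate_id : List String := ["2101", "2102"]

def Spec_generate_id (students : List String) (out : String) : Prop := out = generate_id_alt students
instance (students : List String) (out : String) : Decidable (Spec_generate_id students out) := by unfold Spec_generate_id; infer_instance

-- ===== CLAIM (what is proved, stated in full; the proofs are below) =====
def Claim_equal_generate_id : Prop := ∀ (students : List String), Dom_generate_id students → Pre_generate_id students → Spec_generate_id students (generate_id students)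

-- ===== LEMMAS AND PROOFS =====

-- the candidate string str(n).zfill(4), as both loops build it
def repS (n : Nat) : String := PySem.Str.zfill (PySem.Int.toStr (n : Int)) 4
-- its character list
def repChars (n : Nat) : List Char := PySem.Chars.zfill (Nat.toDigits 10 n) 4
-- "the id str(n).zfill(4) occurs in some student" — A's loop condition at counter n
def Pfun (students : List String) (n : Nat) : Prop :=
  (students.any fun student => PySem.Str.isIn (repS n) student) = true

lemma toDigitsCore_zero (n : Nat) (ds : List Char) : Nat.toDigitsCore 10 0 n ds = ds := by
  rw [Nat.toDigitsCore]

lemma toDigitsCore_succ (fuel n : Nat) (ds : List Char) :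
    Nat.toDigitsCore 10 (fuel+1) n ds =
      if n / 10 = 0 then (n % 10).digitChar :: ds
      else Nat.toDigitsCore 10 fuel (n / 10) ((n % 10).digitChar :: ds) := by
  rw [Nat.toDigitsCore]

lemma toDigitsCore_append (fuel : Nat) : ∀ (n : Nat) (ds : List Char),
    Nat.toDigitsCore 10 fuel n ds = Nat.toDigitsCore 10 fuel n [] ++ ds := by
  induction fuel with
  | zero => intro n ds; rw [toDigitsCore_zero, toDigitsCore_zero]; rfl
  | succ f ih =>
    intro n ds
    rw [toDigitsCore_succ, toDigitsCore_succ]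
    by_cases h : n / 10 = 0
    · simp [h]
    · simp only [h, if_false]
      rw [ih (n / 10) ((n % 10).digitChar :: ds), ih (n / 10) [(n % 10).digitChar]]
      simp

lemma toDigitsCore_len (fuel : Nat) : ∀ n : Nat, n < fuel →
    (Nat.toDigitsCore 10 fuel n []).length = Nat.log 10 n + 1 := by
  induction fuel with
  | zero => intro n h; omega
  | succ f ih =>
    intro n h
    rw [toDigitsCore_succ]
    by_cases h0 : n / 10 = 0
    · have hn10 : n < 10 := by
        by_contra hge
        have := Nat.div_pos (by omega : 10 ≤ n) (by norm_num)
        omega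
      simp [h0, Nat.log_of_lt hn10]
    · have hge : 10 ≤ n := by
        by_contra hlt
        exact h0 (Nat.div_eq_of_lt (by omega))
      have hlt : n / 10 < f := by
        have := Nat.div_lt_self (by omega : 0 < n) (by norm_num : 1 < 10)
        omega
      simp only [h0, if_false]
      rw [toDigitsCore_append, List.length_append, ih (n / 10) hlt]
      have hpos : 0 < Nat.log 10 n := Nat.log_pos (by norm_num) hge
      have := Nat.log_div_base 10 n
      simp
      omega

lemma digitChar_isdigit : ∀ m : Nat, m < 10 → PySem.Chars.isdigit (Nat.digitChar m) = true := by
  decide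

lemma toDigitsCore_digits (fuel : Nat) : ∀ n : Nat, n < fuel →
    ∀ c ∈ Nat.toDigitsCore 10 fuel n [], PySem.Chars.isdigit c = true := by
  induction fuel with
  | zero => intro n h; omega
  | succ f ih =>
    intro n h c hc
    rw [toDigitsCore_succ] at hc
    by_cases h0 : n / 10 = 0
    · simp [h0] at hc
      subst hc
      exact digitChar_isdigit _ (Nat.mod_lt _ (by norm_num))
    · simp only [h0, if_false] at hc
      rw [toDigitsCore_append] at hc
      have hge : 10 ≤ n := by
        by_contra hlt
        exact h0 (Nat.div_eq_of_lt (by omega))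
      have hlt : n / 10 < f := by
        have := Nat.div_lt_self (by omega : 0 < n) (by norm_num : 1 < 10)
        omega
      rcases List.mem_append.mp hc with h1 | h1
      · exact ih (n / 10) hlt c h1
      · simp at h1
        subst h1
        exact digitChar_isdigit _ (Nat.mod_lt _ (by norm_num))

lemma toDigits_len (n : Nat) : (Nat.toDigits 10 n).length = Nat.log 10 n + 1 :=
  toDigitsCore_len (n+1) n (Nat.lt_succ_self n)

lemma toDigits_digits (n : Nat) : ∀ c ∈ Nat.toDigits 10 n, PySem.Chars.isdigit c = true :=
  toDigitsCore_digits (n+1) n (Nat.lt_succ_self n)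

lemma toDigits_ne_nil (n : Nat) : Nat.toDigits 10 n ≠ [] := by
  intro h
  have := toDigits_len n
  rw [h] at this
  simp at this

lemma isdigit_ne_sign {c : Char} (h : PySem.Chars.isdigit c = true) : ¬(c = '+' ∨ c = '-') := by
  rintro (rfl | rfl) <;> revert h <;> decide

lemma zfill_of_digits (cs : List Char) (hne : cs ≠ []) (hd : ∀ c ∈ cs, PySem.Chars.isdigit c = true) :
    PySem.Chars.zfill cs 4 = List.replicate (4 - cs.length) '0' ++ cs := by
  rw [PySem.Chars.zfill.eq_def]
  by_cases hlen : (4 : Int) ≤ (cs.length : Int)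
  · have h4 : 4 ≤ cs.length := by exact_mod_cast hlen
    rw [if_pos hlen]
    rw [show 4 - cs.length = 0 by omega]
    simp
  · rw [if_neg hlen]
    match cs, hne with
    | c :: rest, _ =>
      have hc : ¬(c = '+' ∨ c = '-') := isdigit_ne_sign (hd c (by simp))
      simp only [hc, if_false]
      norm_num
      omega

lemma repChars_eq (n : Nat) :
    repChars n = List.replicate (4 - (Nat.toDigits 10 n).length) '0' ++ Nat.toDigits 10 n :=
  zfill_of_digits _ (toDigits_ne_nil n) (toDigits_digits n)

lemma repChars_len (n : Nat) : (repChars n).length = max (Nat.log 10 n + 1) 4 := by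
  rw [repChars_eq, List.length_append, List.length_replicate, toDigits_len]
  omega

lemma repChars_digits (n : Nat) : ∀ c ∈ repChars n, PySem.Chars.isdigit c = true := by
  intro c hc
  rw [repChars_eq] at hc
  rcases List.mem_append.mp hc with h | h
  · have := List.eq_of_mem_replicate h
    subst this
    decide
  · exact toDigits_digits n c h

lemma repChars_strIsdigit (n : Nat) : PySem.Chars.strIsdigit (repChars n) = true := by
  rw [PySem.Chars.strIsdigit]
  have hlen : (repChars n).length = max (Nat.log 10 n + 1) 4 := repChars_len n
  have hne : repChars n ≠ [] := by
    intro h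
    rw [h] at hlen
    simp at hlen
    omega
  simp [hne, List.all_eq_true]
  exact repChars_digits n

lemma repS_toList (n : Nat) : (repS n).toList = repChars n := by
  rw [repS, repChars, PySem.Str.zfill, String.toList_ofList, PySem.Int.toStr,
    String.toList_ofList, PySem.Int.toChars]
  have : ¬((n : Int) < 0) := not_lt.mpr (Int.natCast_nonneg n)
  simp [this]

lemma repChars_len4 {n : Nat} (h : n < 10000) : (repChars n).length = 4 := by
  rw [repChars_len]
  rcases Nat.eq_zero_or_pos n with rfl | hn0
  · simp
  · have : Nat.log 10 n < 4 := (Nat.log_lt_iff_lt_pow (by norm_num) (by omega)).mpr (by norm_num; omega)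
    omega

lemma repChars_len_of_ge {n : Nat} (h : 10000 ≤ n) : 5 ≤ (repChars n).length := by
  rw [repChars_len]
  have : 4 ≤ Nat.log 10 n :=
    (Nat.le_log_iff_pow_le (by norm_num) (by omega : n ≠ 0)).mpr (by norm_num; omega)
  omega

-- ===== decimal value of a digit string =====
def valC (c : Char) : Nat := c.toNat - 48
def valL (cs : List Char) : Nat := cs.foldl (fun a c => 10 * a + valC c) 0

lemma isdigit_bounds {c : Char} (h : PySem.Chars.isdigit c = true) :
    48 ≤ c.toNat ∧ c.toNat ≤ 57 := by
  rw [PySem.Chars.isdigit] at h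
  simp only [Bool.and_eq_true, decide_eq_true_eq] at h
  obtain ⟨h1, h2⟩ := h
  constructor
  · exact h1
  · exact h2

lemma valL_from (cs : List Char) : ∀ a : Nat,
    cs.foldl (fun a c => 10 * a + valC c) a = a * 10 ^ cs.length + valL cs := by
  induction cs with
  | nil => intro a; simp [valL]
  | cons c t ih =>
    intro a
    rw [List.foldl_cons, ih (10 * a + valC c)]
    have h2 : valL (c :: t) = valC c * 10 ^ t.length + valL t := by
      rw [valL, List.foldl_cons, ih (10 * 0 + valC c)]
      simp [valL]
    rw [h2, List.length_cons, pow_succ]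
    ring

lemma valL_cons (c : Char) (t : List Char) :
    valL (c :: t) = valC c * 10 ^ t.length + valL t := by
  rw [valL, List.foldl_cons, valL_from]
  simp

lemma valL_lt (cs : List Char) (hd : ∀ c ∈ cs, PySem.Chars.isdigit c = true) :
    valL cs < 10 ^ cs.length := by
  induction cs with
  | nil => simp [valL]
  | cons c t ih =>
    rw [valL_cons]
    have hc : valC c ≤ 9 := by
      have := isdigit_bounds (hd c (by simp))
      unfold valC
      omega
    have ht : valL t < 10 ^ t.length := ih (fun x hx => hd x (by simp [hx]))
    have : valC c * 10 ^ t.length ≤ 9 * 10 ^ t.length :=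
      Nat.mul_le_mul_right _ hc
    rw [List.length_cons, pow_succ]
    omega

lemma valL_append_singleton (cs : List Char) (c : Char) :
    valL (cs ++ [c]) = 10 * valL cs + valC c := by
  rw [valL, List.foldl_append, List.foldl_cons, List.foldl_nil]
  rfl

lemma valC_digitChar : ∀ m : Nat, m < 10 → valC (Nat.digitChar m) = m := by
  decide

lemma valL_toDigitsCore (fuel : Nat) : ∀ n : Nat, n < fuel →
    valL (Nat.toDigitsCore 10 fuel n []) = n := by
  induction fuel with
  | zero => intro n h; omega
  | succ f ih =>
    intro n h
    rw [toDigitsCore_succ]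
    by_cases h0 : n / 10 = 0
    · have hn10 : n < 10 := by
        by_contra hge
        have := Nat.div_pos (by omega : 10 ≤ n) (by norm_num)
        omega
      simp only [h0, if_true]
      rw [show ((n % 10).digitChar :: []) = [] ++ [(n % 10).digitChar] by simp,
        valL_append_singleton]
      rw [valC_digitChar _ (Nat.mod_lt _ (by norm_num))]
      simp [valL]
      omega
    · have hge : 10 ≤ n := by
        by_contra hlt
        exact h0 (Nat.div_eq_of_lt (by omega))
      have hlt : n / 10 < f := by
        have := Nat.div_lt_self (by omega : 0 < n) (by norm_num : 1 < 10)
        omega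
      simp only [h0, if_false]
      rw [toDigitsCore_append, valL_append_singleton, ih (n / 10) hlt,
        valC_digitChar _ (Nat.mod_lt _ (by norm_num))]
      omega

lemma valL_replicate_zero (k : Nat) (ds : List Char) :
    valL (List.replicate k '0' ++ ds) = valL ds := by
  induction k with
  | zero => simp
  | succ m ih =>
    rw [List.replicate_succ, List.cons_append, valL, List.foldl_cons]
    have : (10 * 0 + valC '0') = 0 := by decide
    rw [this]
    exact ih

lemma valL_repChars (n : Nat) : valL (repChars n) = n := by
  rw [repChars_eq, valL_replicate_zero]
  exact valL_toDigitsCore (n+1) n (Nat.lt_succ_self n)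

-- head-weighted comparison of two "digit-block" decompositions
lemma block_lt_iff (va vb vs vt B : Nat) (_hB : 0 < B) (h1 : vs < B) (h2 : vt < B) :
    va * B + vs < vb * B + vt ↔ va < vb ∨ (va = vb ∧ vs < vt) := by
  constructor
  · intro h
    rcases lt_trichotomy va vb with hv | hv | hv
    · exact Or.inl hv
    · subst hv
      exact Or.inr ⟨rfl, by omega⟩
    · exfalso
      have h3 : (vb + 1) * B ≤ va * B := Nat.mul_le_mul_right _ (by omega)
      have h4 : (vb + 1) * B = vb * B + B := by ring
      omega
  · rintro (hv | ⟨rfl, hs⟩)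
    · have h3 : (va + 1) * B ≤ vb * B := Nat.mul_le_mul_right _ (by omega)
      have h4 : (va + 1) * B = va * B + B := by ring
      omega
    · omega

lemma char_lt_iff {a b : Char} (ha : PySem.Chars.isdigit a = true)
    (hb : PySem.Chars.isdigit b = true) : a < b ↔ valC a < valC b := by
  have h1 := isdigit_bounds ha
  have h2 := isdigit_bounds hb
  have : a < b ↔ a.toNat < b.toNat := by
    rw [Char.lt_def]; exact UInt32.lt_iff_toNat_lt
  rw [this]
  unfold valC
  omega

lemma char_eq_iff {a b : Char} (ha : PySem.Chars.isdigit a = true)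
    (hb : PySem.Chars.isdigit b = true) : a = b ↔ valC a = valC b := by
  constructor
  · intro h; rw [h]
  · intro h
    have h1 := isdigit_bounds ha
    have h2 := isdigit_bounds hb
    have htn : a.toNat = b.toNat := by unfold valC at h; omega
    exact Char.ext (UInt32.toNat_inj.mp htn)

lemma lex_iff_val : ∀ (s t : List Char),
    (∀ c ∈ s, PySem.Chars.isdigit c = true) → (∀ c ∈ t, PySem.Chars.isdigit c = true) →
    s.length = t.length → (List.Lex (· < ·) s t ↔ valL s < valL t) := by
  intro s
  induction s with
  | nil =>
    intro t _ _ hlen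
    have : t = [] := List.eq_nil_of_length_eq_zero hlen.symm
    subst this
    simp [List.not_lex_nil, valL]
  | cons a s' ih =>
    intro t hds hdt hlen
    match t with
    | [] => simp at hlen
    | b :: t' =>
      have hlen' : s'.length = t'.length := by simpa using hlen
      have hda : PySem.Chars.isdigit a = true := hds a (by simp)
      have hdb : PySem.Chars.isdigit b = true := hdt b (by simp)
      have hds' : ∀ c ∈ s', PySem.Chars.isdigit c = true := fun c hc => hds c (by simp [hc])
      have hdt' : ∀ c ∈ t', PySem.Chars.isdigit c = true := fun c hc => hdt c (by simp [hc])
      have hcons : List.Lex (· < ·) (a :: s') (b :: t') ↔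
          a < b ∨ (a = b ∧ List.Lex (· < ·) s' t') := by
        constructor
        · intro h
          cases h with
          | rel h => exact Or.inl h
          | cons h => exact Or.inr ⟨rfl, h⟩
        · rintro (h | ⟨rfl, h⟩)
          · exact List.Lex.rel h
          · exact List.Lex.cons h
      rw [hcons, valL_cons, valL_cons, hlen']
      rw [block_lt_iff (valC a) (valC b) (valL s') (valL t') (10 ^ t'.length)
        (Nat.pow_pos (by norm_num))
        (by rw [← hlen']; exact valL_lt s' hds')
        (valL_lt t' hdt')]
      rw [char_lt_iff hda hdb, char_eq_iff hda hdb, ih t' hds' hdt' hlen']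

-- a length-4 all-digit character list is exactly repChars of its value
lemma digit4_eq_repChars (cs : List Char) (hd : ∀ c ∈ cs, PySem.Chars.isdigit c = true)
    (hl : cs.length = 4) : ∃ m : Nat, m < 10000 ∧ cs = repChars m := by
  refine ⟨valL cs, by have := valL_lt cs hd; rw [hl] at this; norm_num at this; exact this, ?_⟩
  have hm : valL cs < 10000 := by
    have := valL_lt cs hd; rw [hl] at this; norm_num at this; exact this
  have hlen2 : (repChars (valL cs)).length = 4 := repChars_len4 hm
  have hd2 := repChars_digits (valL cs)
  have hval2 : valL (repChars (valL cs)) = valL cs := valL_repChars _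
  by_contra hne
  rcases lt_trichotomy cs (repChars (valL cs)) with h | h | h
  · have := (lex_iff_val cs _ hd hd2 (by omega)).mp h
    omega
  · exact hne h
  · have := (lex_iff_val _ cs hd2 hd (by omega)).mp h
    omega

lemma repS_toList_lt {m n : Nat} (hm : m < 10000) (hn : n < 10000) (h : m < n) :
    List.Lex (· < ·) (repChars m) (repChars n) := by
  refine (lex_iff_val _ _ (repChars_digits m) (repChars_digits n) ?_).mpr ?_
  · rw [repChars_len4 hm, repChars_len4 hn]
  · rw [valL_repChars, valL_repChars]; exact h

lemma repS_lt {m n : Nat} (hm : m < 10000) (hn : n < 10000) (h : m < n) :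
    repS m < repS n := by
  rw [String.lt_iff_toList_lt, repS_toList, repS_toList]
  exact repS_toList_lt hm hn h

-- elements of the forbidden set: length-4 all-digit strings
def Digit4 (x : String) : Prop :=
  x.toList.length = 4 ∧ ∀ c ∈ x.toList, PySem.Chars.isdigit c = true

lemma digit4_repS (x : String) (h : Digit4 x) : ∃ m : Nat, m < 10000 ∧ x = repS m := by
  obtain ⟨hl, hd⟩ := h
  obtain ⟨m, hm, hcs⟩ := digit4_eq_repChars x.toList hd hl
  refine ⟨m, hm, ?_⟩
  have : x.toList = (repS m).toList := by rw [hcs, repS_toList]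
  exact String.toList_injective this

lemma repS_le_of_digit4 {n : Nat} {x : String} (hn : n < 10000) (hx : Digit4 x)
    (h : repS n < x) : n + 1 ≤ 10000 ∧ repS (n + 1) ≤ x := by
  obtain ⟨m, hm, rfl⟩ := digit4_repS x hx
  have hlt : n < m := by
    by_contra hge
    rcases Nat.lt_or_ge m n with h2 | h2
    · exact absurd h (not_lt.mpr (le_of_lt (repS_lt hm hn h2)))
    · have : m = n := by omega
      subst this
      exact absurd h (lt_irrefl _)
  constructor
  · omega
  · rcases Nat.eq_or_lt_of_le (by omega : n + 1 ≤ m) with h2 | h2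
    · rw [h2]
    · exact le_of_lt (repS_lt (by omega) hm h2)

-- ===== membership in buildForbidden =====
-- generic membership through a set-building foldl
lemma mem_foldl_set {α : Type} (x : String) (f : PySem.Set String → α → PySem.Set String)
    (C : α → Prop) (h : ∀ acc a, x ∈ f acc a ↔ x ∈ acc ∨ C a) :
    ∀ (l : List α) (init : PySem.Set String), x ∈ l.foldl f init ↔ x ∈ init ∨ ∃ a ∈ l, C a := by
  intro l
  induction l with
  | nil => intro init; simp
  | cons a t ih =>
    intro init
    rw [List.foldl_cons, ih, h]
    simp
    tauto

lemma mem_inner (cs : List Char) (x : String) (init : PySem.Set String) :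
    x ∈ (PySem.List.pyRange 0 ((cs.length : Int) - 3)).foldl
          (fun forbidden i =>
            let t := PySem.List.slice cs (some i) (some (i + 4))
            if PySem.Chars.strIsdigit t then PySem.Set.add forbidden (String.ofList t)
            else forbidden) init
      ↔ x ∈ init ∨ ∃ k : Nat, k + 4 ≤ cs.length ∧
          PySem.Chars.strIsdigit ((cs.drop k).take 4) = true ∧
          x = String.ofList ((cs.drop k).take 4) := by
  rw [mem_foldl_set x _
    (fun i => PySem.Chars.strIsdigit (PySem.List.slice cs (some i) (some (i + 4))) = true ∧
      x = String.ofList (PySem.List.slice cs (some i) (some (i + 4))))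
    (by
      intro acc i
      dsimp only
      split_ifs with hdig
      · rw [PySem.Set.mem_add]
        tauto
      · simp [hdig])]
  constructor
  · rintro (hx | ⟨i, hi, hdig, hx⟩)
    · exact Or.inl hx
    · right
      rw [PySem.List.mem_pyRange_one] at hi
      obtain ⟨h0, hub⟩ := hi
      have hsl : PySem.List.slice cs (some i) (some (i + 4)) = (cs.drop i.toNat).take 4 := by
        rw [show i = ((i.toNat : Nat) : Int) by omega,
          show ((i.toNat : Nat) : Int) + 4 = ((i.toNat + 4 : Nat) : Int) by push_cast; ring,
          PySem.List.slice_natCast]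
        congr 1
        omega
      exact ⟨i.toNat, by omega, by rw [← hsl]; exact hdig, by rw [← hsl]; exact hx⟩
  · rintro (hx | ⟨k, hk, hdig, hx⟩)
    · exact Or.inl hx
    · right
      refine ⟨(k : Int), ?_, ?_, ?_⟩
      · rw [PySem.List.mem_pyRange_one]
        constructor
        · positivity
        · omega
      · rw [show ((k : Nat) : Int) + 4 = ((k + 4 : Nat) : Int) by push_cast; ring,
          PySem.List.slice_natCast, show k + 4 - k = 4 by omega]
        exact hdig
      · rw [show ((k : Nat) : Int) + 4 = ((k + 4 : Nat) : Int) by push_cast; ring,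
          PySem.List.slice_natCast, show k + 4 - k = 4 by omega]
        exact hx

lemma mem_buildForbidden (students : List String) (x : String) :
    x ∈ buildForbidden students ↔
      ∃ st ∈ students, ∃ k : Nat, k + 4 ≤ st.toList.length ∧
        PySem.Chars.strIsdigit ((st.toList.drop k).take 4) = true ∧
        x = String.ofList ((st.toList.drop k).take 4) := by
  rw [buildForbidden, mem_foldl_set x _
    (fun st => ∃ k : Nat, k + 4 ≤ st.toList.length ∧
      PySem.Chars.strIsdigit ((st.toList.drop k).take 4) = true ∧
      x = String.ofList ((st.toList.drop k).take 4))
    (by intro acc st; exact mem_inner st.toList x acc)]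
  simp [PySem.Set.empty]

lemma strIsdigit_all {cs : List Char} (h : PySem.Chars.strIsdigit cs = true) :
    cs ≠ [] ∧ ∀ c ∈ cs, PySem.Chars.isdigit c = true := by
  rw [PySem.Chars.strIsdigit] at h
  simp only [Bool.and_eq_true, List.all_eq_true, Bool.not_eq_true'] at h
  obtain ⟨h1, h2⟩ := h
  exact ⟨by simpa [List.isEmpty_iff] using h1, h2⟩

lemma digit4_of_mem (students : List String) (x : String) (hx : x ∈ buildForbidden students) :
    Digit4 x := by
  rw [mem_buildForbidden] at hx
  obtain ⟨st, _, k, hk, hdig, rfl⟩ := hx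
  have hlen : ((st.toList.drop k).take 4).length = 4 := by
    rw [List.length_take, List.length_drop]
    omega
  constructor
  · rw [String.toList_ofList]; exact hlen
  · rw [String.toList_ofList]
    exact (strIsdigit_all hdig).2

lemma window_iff_infix (t cs : List Char) (hw : t.length = 4) :
    (∃ k : Nat, k + 4 ≤ cs.length ∧ (cs.drop k).take 4 = t) ↔ t <:+: cs := by
  constructor
  · rintro ⟨k, hk, rfl⟩
    exact ((List.take_prefix 4 (cs.drop k)).isInfix).trans ((List.drop_suffix k cs).isInfix)
  · intro hinf
    have hin : PySem.Chars.isIn t cs = true := (PySem.Chars.isIn_iff_infix t cs).mpr hinf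
    obtain ⟨j, hpre⟩ := (PySem.Chars.exists_prefix_drop_iff_isIn t cs).mpr hin
    have htake : t = (cs.drop j).take t.length := (List.prefix_iff_eq_take).mp hpre
    have hlen2 : t.length ≤ (cs.drop j).length := hpre.length_le
    rw [List.length_drop] at hlen2
    exact ⟨j, by omega, by rw [← hw, ← htake]⟩

lemma bridge (students : List String) {n : Nat} (hn : n < 10000) :
    (repS n ∈ buildForbidden students ↔ Pfun students n) := by
  have hlen : (repChars n).length = 4 := repChars_len4 hn
  rw [mem_buildForbidden, Pfun, List.any_eq_true]
  constructor
  · rintro ⟨st, hst, k, hk, hdig, heq⟩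
    refine ⟨st, hst, ?_⟩
    have hwin : (st.toList.drop k).take 4 = repChars n := by
      have := congrArg String.toList heq
      rw [String.toList_ofList, repS_toList] at this
      exact this.symm
    rw [PySem.Str.isIn_iff_infix, repS_toList]
    exact (window_iff_infix (repChars n) st.toList hlen).mp ⟨k, hk, hwin⟩
  · rintro ⟨st, hst, hin⟩
    rw [PySem.Str.isIn_iff_infix, repS_toList] at hin
    obtain ⟨k, hk, hwin⟩ := (window_iff_infix (repChars n) st.toList hlen).mpr hin
    refine ⟨st, hst, k, hk, by rw [hwin]; exact repChars_strIsdigit n, ?_⟩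
    rw [hwin, ← repS_toList, String.ofList_toList]

lemma nodup_buildForbidden (students : List String) : (buildForbidden students).Nodup := by
  rw [buildForbidden]
  have inner : ∀ (s : String) (acc : PySem.Set String), acc.Nodup →
      ((PySem.List.pyRange 0 ((s.toList.length : Int) - 3)).foldl
        (fun forbidden i =>
          let t := PySem.List.slice s.toList (some i) (some (i + 4))
          if PySem.Chars.strIsdigit t then PySem.Set.add forbidden (String.ofList t)
          else forbidden) acc).Nodup := by
    intro s acc hacc
    induction PySem.List.pyRange 0 ((s.toList.length : Int) - 3) generalizing acc with
    | nil => exact hacc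
    | cons i t ih =>
      rw [List.foldl_cons]
      apply ih
      dsimp only
      split_ifs with h
      · exact PySem.Set.nodup_add _ _ hacc
      · exact hacc
  have outer : ∀ (l : List String) (acc : PySem.Set String), acc.Nodup →
      (l.foldl (fun forbidden s =>
        (PySem.List.pyRange 0 ((s.toList.length : Int) - 3)).foldl
          (fun forbidden i =>
            let t := PySem.List.slice s.toList (some i) (some (i + 4))
            if PySem.Chars.strIsdigit t then PySem.Set.add forbidden (String.ofList t)
            else forbidden) forbidden) acc).Nodup := by
    intro l
    induction l with
    | nil => intro acc hacc; exact hacc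
    | cons s t ih =>
      intro acc hacc
      rw [List.foldl_cons]
      exact ih _ (inner s acc hacc)
  exact outer students PySem.Set.empty (by simp [PySem.Set.empty])

-- repS is injective-enough up to 10000: values below 10000 never collide with larger ones
lemma repS_ne {n r : Nat} (hn : n < 10000) (hnr : n < r) (hr : r ≤ 10000) :
    repS n ≠ repS r := by
  rcases Nat.lt_or_ge r 10000 with h | h
  · exact ne_of_lt (repS_lt hn h hnr)
  · intro heq
    have h10000 : r = 10000 := by omega
    have h1 : (repS n).toList.length = 4 := by rw [repS_toList]; exact repChars_len4 hn
    have h2 : 5 ≤ (repS r).toList.length := by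
      rw [repS_toList]; exact repChars_len_of_ge (by omega)
    rw [heq] at h1
    omega

-- ===== A's loop =====
lemma loopA_eq (students : List String) (N : Nat) (hN : ¬ Pfun students N)
    (hmin : ∀ m, m < N → Pfun students m) :
    ∀ (fuel n : Nat), n ≤ N → N < n + fuel →
      generate_id_loop students fuel (n : Int) = repS N := by
  intro fuel
  induction fuel with
  | zero => intro n h1 h2; omega
  | succ f ih =>
    intro n h1 h2
    rw [generate_id_loop]
    by_cases hn : n = N
    · subst hn
      have : (students.any fun student =>
          PySem.Str.isIn (PySem.Str.zfill (PySem.Int.toStr (n : Int)) 4) student) = false := by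
        rw [← Bool.not_eq_true]
        exact hN
      simp only [this]
      rfl
    · have hP : Pfun students n := hmin n (by omega)
      rw [Pfun] at hP
      simp only [repS] at hP
      simp only [hP, Bool.not_true, Bool.false_eq_true, if_false]
      rw [show (n : Int) + 1 = ((n + 1 : Nat) : Int) by push_cast; ring]
      exact ih (n + 1) (by omega) (by omega)

lemma pvMaxLen_spec (students : List String) :
    ∀ st ∈ students, st.toList.length ≤ pvMaxLen students :=
  (PySem.List.le_foldl_max_nat students (fun s => s.toList.length) 0).2

lemma free_top (students : List String) : ¬ Pfun students (10 ^ (pvMaxLen students + 3)) := by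
  intro h
  rw [Pfun, List.any_eq_true] at h
  obtain ⟨st, hst, hin⟩ := h
  rw [PySem.Str.isIn_iff_infix, repS_toList] at hin
  have hlen := hin.length_le
  have hmax := pvMaxLen_spec students st hst
  rw [repChars_len, Nat.log_pow (by norm_num : 1 < 10)] at hlen
  omega

-- ===== B's ordered walk =====
lemma walk_spec (L : List String) :
    ∀ n : Nat, n ≤ 10000 →
    L.Pairwise (· < ·) →
    (∀ x ∈ L, Digit4 x) →
    (∀ x ∈ L, repS n ≤ x) →
    ∃ r : Nat,
      L.foldl (fun number t =>
        if t == PySem.Str.zfill (PySem.Int.toStr number) 4 then number + 1 else number)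
        (n : Int) = (r : Int) ∧
      n ≤ r ∧ r ≤ 10000 ∧ repS r ∉ L ∧ (∀ k, n ≤ k → k < r → repS k ∈ L) := by
  induction L with
  | nil =>
    intro n hn _ _ _
    exact ⟨n, by simp, le_refl n, hn, by simp, fun k h1 h2 => by omega⟩
  | cons t rest ih =>
    intro n hn hpair hd4 hlb
    have hrest_pair : rest.Pairwise (· < ·) := (List.pairwise_cons.mp hpair).2
    have ht_lt : ∀ x ∈ rest, t < x := (List.pairwise_cons.mp hpair).1
    have hd4t : Digit4 t := hd4 t (by simp)
    rw [List.foldl_cons]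
    by_cases heq : t = repS n
    · -- match: this id is taken, advance the counter
      have hn4 : n < 10000 := by
        by_contra hge
        have h10000 : n = 10000 := by omega
        have := hd4t.1
        rw [heq, repS_toList, h10000] at this
        have := repChars_len_of_ge (le_refl 10000)
        omega
      have hbeq : (t == PySem.Str.zfill (PySem.Int.toStr (n : Int)) 4) = true := by
        rw [beq_iff_eq]; exact heq
      rw [hbeq, if_pos rfl]
      rw [show (n : Int) + 1 = ((n + 1 : Nat) : Int) by push_cast; ring]
      have hlb' : ∀ x ∈ rest, repS (n + 1) ≤ x := by
        intro x hx
        have := repS_le_of_digit4 hn4 (hd4 x (by simp [hx])) (heq ▸ ht_lt x hx)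
        exact this.2
      obtain ⟨r, hfold, hr1, hr2, hr3, hr4⟩ := ih (n + 1) (by omega)
        hrest_pair (fun x hx => hd4 x (by simp [hx])) hlb'
      refine ⟨r, hfold, by omega, hr2, ?_, ?_⟩
      · intro hmem
        rcases List.mem_cons.mp hmem with h | h
        · exact repS_ne hn4 (by omega) hr2 (h ▸ heq.symm)
        · exact hr3 h
      · intro k h1 h2
        rcases Nat.eq_or_lt_of_le h1 with h3 | h3
        · rw [← h3, ← heq]; simp
        · exact List.mem_cons_of_mem _ (hr4 k (by omega) h2)
    · -- no match: by sortedness nothing below the counter remains, result stays n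
      have hbeq : (t == PySem.Str.zfill (PySem.Int.toStr (n : Int)) 4) = false := by
        rw [beq_eq_false_iff_ne]; exact heq
      rw [hbeq]
      simp only [Bool.false_eq_true, if_false]
      have htgt : repS n < t := lt_of_le_of_ne (hlb t (by simp)) (Ne.symm heq)
      have hlb' : ∀ x ∈ rest, repS n ≤ x := fun x hx => le_of_lt (lt_trans htgt (ht_lt x hx))
      obtain ⟨r, hfold, hr1, hr2, hr3, hr4⟩ := ih n hn hrest_pair
        (fun x hx => hd4 x (by simp [hx])) hlb'
      have hrn : r = n := by
        by_contra hne
        have hmem : repS n ∈ rest := hr4 n (le_refl n) (by omega)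
        exact absurd (lt_trans htgt (ht_lt _ hmem)) (lt_irrefl _)
      subst hrn
      refine ⟨r, hfold, le_refl r, hr2, ?_, fun k h1 h2 => by omega⟩
      intro hmem
      rcases List.mem_cons.mp hmem with h | h
      · exact heq h.symm
      · exact hr3 h

-- ===== VERDICT (by name: the statement is the Claim_ definition above) =====
theorem generate_id_spec : Claim_equal_generate_id := by
  intro students _ hpre
  unfold Spec_generate_id
  rw [Pre_generate_id, List.any_eq_true] at hpre
  obtain ⟨n0, hmem, hfreeb⟩ := hpre
  rw [List.mem_range'_1] at hmem
  haveI : DecidablePred (fun n => ¬ Pfun students n) := fun n => by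
    unfold Pfun; infer_instance
  have hn0lt : n0 < 10000 := by omega
  have hfree0' : ¬ Pfun students n0 := by
    rw [Bool.not_eq_eq_eq_not, Bool.not_true] at hfreeb
    rw [Pfun, repS, hfreeb]
    exact Bool.false_ne_true
  have hfree : ∃ n, ¬ Pfun students n := ⟨n0, hfree0'⟩
  set N := Nat.find hfree with hNdef
  have hN : ¬ Pfun students N := Nat.find_spec hfree
  have hmin : ∀ m, m < N → Pfun students m := fun m hm =>
    of_not_not (Nat.find_min hfree hm)
  have hNlt : N < 10000 := lt_of_le_of_lt (Nat.find_min' hfree hfree0') hn0lt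
  have hNle : N ≤ 10 ^ (pvMaxLen students + 3) := Nat.find_min' hfree (free_top students)
  have hA : generate_id students = repS N := by
    rw [generate_id, show (0 : Int) = ((0 : Nat) : Int) by norm_num]
    exact loopA_eq students N hN hmin _ 0 (by omega) (by omega)
  set L := PySem.List.sorted (buildForbidden students) (fun x => x) false with hLdef
  have hperm : L.Perm (buildForbidden students) := PySem.List.sorted_perm _ _ _
  have hnodupL : L.Nodup := hperm.nodup_iff.mpr (nodup_buildForbidden students)
  have hle : L.Pairwise (· ≤ ·) := PySem.List.sorted_pairwise _ _
  have hlt : L.Pairwise (· < ·) :=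
    (hle.and hnodupL).imp (fun h => lt_of_le_of_ne h.1 h.2)
  have hmemL : ∀ x : String, x ∈ L ↔ x ∈ buildForbidden students := fun x =>
    PySem.List.mem_sorted _ _ _ x
  have hd4 : ∀ x ∈ L, Digit4 x := fun x hx =>
    digit4_of_mem students x ((hmemL x).mp hx)
  have hlb : ∀ x ∈ L, repS 0 ≤ x := by
    intro x hx
    obtain ⟨m, hm, rfl⟩ := digit4_repS x (hd4 x hx)
    rcases Nat.eq_zero_or_pos m with rfl | hpos
    · exact le_refl _
    · exact le_of_lt (repS_lt (by norm_num) hm hpos)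
  obtain ⟨r, hfold, _, hr2, hr3, hr4⟩ := walk_spec L 0 (by norm_num) hlt hd4 hlb
  have hrN : r = N := by
    have hrleN : r ≤ N := by
      by_contra hgt
      have hgt' : N < r := by omega
      have hNmem : repS N ∈ L := hr4 N (by omega) hgt' 
      exact hN ((bridge students hNlt).mp ((hmemL _).mp hNmem))
    have hfreer : ¬ Pfun students r := by
      intro hP
      exact hr3 ((hmemL _).mpr ((bridge students (by omega)).mpr hP))
    have := Nat.find_min' hfree hfreer
    omega
  have halt : generate_id_alt students = repS r := by
    push_cast at hfold
    unfold generate_id_alt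
    dsimp only
    rw [← hLdef, hfold, repS]
  rw [hA, halt, hrN]
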